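-- pv_equiv track=rewrite | github.com/joseftoman/advent-of-code | 2024/21/solution_A.py | navigate_numbers
-- ===== SOURCE A (Python) =====
-- def navigate_numbers(code):
--     keypad = {
--         '7': (0, 0), '8': (1, 0), '9': (2, 0),
--         '4': (0, 1), '5': (1, 1), '6': (2, 1),
--         '1': (0, 2), '2': (1, 2), '3': (2, 2),
--                      '0': (1, 3), 'A': (2, 3),
--     }
--
--     output = ''
--     pos = keypad['A']
--
--     for char in code:
--         target = keypad[char]
--
--         if pos[0] == target[0] or pos[1] == target[1]:
--             if pos[0] == target[0]:
--                 char = '^' if target[1] < pos[1] else 'v'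
--             else:
--                 char = '<' if target[0] < pos[0] else '>'
--             output += ''.join([char] * abs(target[0] - pos[0] + target[1] - pos[1]))
--             output += 'A'
--             pos = target
--             continue
--
--         start_vertically = target[0] > pos[0]
--
--         if not start_vertically and target[1] < pos[1] and pos[1] == 3 and target[0] == 0:
--             start_vertically = True
--         if start_vertically and target[1] > pos[1] and pos[0] == 0 and target[1] == 3:
--             start_vertically = False
--
--         if start_vertically:
--             output += ''.join(['^' if target[1] < pos[1] else 'v'] * abs(target[1] - pos[1]))
--         output += ''.join(['<' if target[0] < pos[0] else '>'] * abs(target[0] - pos[0]))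
--         if not start_vertically:
--             output += ''.join(['^' if target[1] < pos[1] else 'v'] * abs(target[1] - pos[1]))
--
--         output += 'A'
--         pos = target
--
--     return output
-- ===== SOURCE B (Python) =====
-- MOVES = {
--     '77': 'A', '78': '>A', '79': '>>A', '74': 'vA', '75': 'v>A', '76': 'v>>A', '71': 'vvA', '72': 'vv>A', '73': 'vv>>A', '70': '>vvvA', '7A': '>>vvvA',
--     '87': '<A', '88': 'A', '89': '>A', '84': '<vA', '85': 'vA', '86': 'v>A', '81': '<vvA', '82': 'vvA', '83': 'vv>A', '80': 'vvvA', '8A': 'vvv>A',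
--     '97': '<<A', '98': '<A', '99': 'A', '94': '<<vA', '95': '<vA', '96': 'vA', '91': '<<vvA', '92': '<vvA', '93': 'vvA', '90': '<vvvA', '9A': 'vvvA',
--     '47': '^A', '48': '^>A', '49': '^>>A', '44': 'A', '45': '>A', '46': '>>A', '41': 'vA', '42': 'v>A', '43': 'v>>A', '40': '>vvA', '4A': '>>vvA',
--     '57': '<^A', '58': '^A', '59': '^>A', '54': '<A', '55': 'A', '56': '>A', '51': '<vA', '52': 'vA', '53': 'v>A', '50': 'vvA', '5A': 'vv>A',
--     '67': '<<^A', '68': '<^A', '69': '^A', '64': '<<A', '65': '<A', '66': 'A', '61': '<<vA', '62': '<vA', '63': 'vA', '60': '<vvA', '6A': 'vvA',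
--     '17': '^^A', '18': '^^>A', '19': '^^>>A', '14': '^A', '15': '^>A', '16': '^>>A', '11': 'A', '12': '>A', '13': '>>A', '10': '>vA', '1A': '>>vA',
--     '27': '<^^A', '28': '^^A', '29': '^^>A', '24': '<^A', '25': '^A', '26': '^>A', '21': '<A', '22': 'A', '23': '>A', '20': 'vA', '2A': 'v>A',
--     '37': '<<^^A', '38': '<^^A', '39': '^^A', '34': '<<^A', '35': '<^A', '36': '^A', '31': '<<A', '32': '<A', '33': 'A', '30': '<vA', '3A': 'vA',
--     '07': '^^^<A', '08': '^^^A', '09': '^^^>A', '04': '^^<A', '05': '^^A', '06': '^^>A', '01': '^<A', '02': '^A', '03': '^>A', '00': 'A', '0A': '>A',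
--     'A7': '^^^<<A', 'A8': '<^^^A', 'A9': '^^^A', 'A4': '^^<<A', 'A5': '<^^A', 'A6': '^^A', 'A1': '^<<A', 'A2': '<^A', 'A3': '^A', 'A0': '<A', 'AA': 'A',
-- }
--
--
-- def navigate_numbers(code):
--     # table-driven: one precomputed move string per (previous key, next key) pair
--     return ''.join(MOVES[a + b] for a, b in zip('A' + code, code))
-- ===== Notes on version B (the rewrite author's own statement) =====
-- stated objective: alternative
-- what changed: B replaces A's per-step geometric path construction (deltas, axis-aligned branch, gap overrides) with a fully precomputed 11x11 transition table: it pairs each code character with its predecessor (the start key for the first) and joins one table lookup per pair, tracking no position at all.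
import Mathlib
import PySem

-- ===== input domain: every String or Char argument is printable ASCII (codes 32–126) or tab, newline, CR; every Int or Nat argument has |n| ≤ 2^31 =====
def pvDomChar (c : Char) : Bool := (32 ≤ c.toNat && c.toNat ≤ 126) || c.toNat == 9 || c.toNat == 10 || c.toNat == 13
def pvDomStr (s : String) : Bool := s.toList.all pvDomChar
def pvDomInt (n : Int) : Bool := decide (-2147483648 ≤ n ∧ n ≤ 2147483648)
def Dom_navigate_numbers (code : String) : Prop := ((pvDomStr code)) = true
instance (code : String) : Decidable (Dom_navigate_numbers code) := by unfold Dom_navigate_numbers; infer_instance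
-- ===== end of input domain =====

-- B replaces A's per-step geometric path construction with a precomputed 11x11 transition
-- table looked up per adjacent key pair of 'A'+code: a table-driven alternative, no position state.

-- ===== PORT A =====
def pvKeypad : PySem.Dict Char (Int × Int) :=
  PySem.Dict.ofList [('7', (0, 0)), ('8', (1, 0)), ('9', (2, 0)),
                     ('4', (0, 1)), ('5', (1, 1)), ('6', (2, 1)),
                     ('1', (0, 2)), ('2', (1, 2)), ('3', (2, 2)),
                     ('0', (1, 3)), ('A', (2, 3))]

-- one iteration of A's for-loop over (output, pos); KeyError is excluded by Pre_, getD is unreached inside it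
def pvStepA (st : String × (Int × Int)) (ch : Char) : String × (Int × Int) :=
  let output := st.1
  let pos := st.2
  let target := (pvKeypad.get? ch).getD (0, 0)
  if pos.1 = target.1 ∨ pos.2 = target.2 then
    let c := if pos.1 = target.1 then (if target.2 < pos.2 then '^' else 'v')
             else (if target.1 < pos.1 then '<' else '>')
    let output := output ++ String.ofList (List.replicate (target.1 - pos.1 + target.2 - pos.2).natAbs c)
    let output := output ++ "A"
    (output, target)
  else
    let sv0 := decide (target.1 > pos.1)
    let sv1 := if !sv0 && decide (target.2 < pos.2 ∧ pos.2 = 3 ∧ target.1 = 0) then true else sv0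
    let sv := if sv1 && decide (target.2 > pos.2 ∧ pos.1 = 0 ∧ target.2 = 3) then false else sv1
    let vert := String.ofList (List.replicate (target.2 - pos.2).natAbs (if target.2 < pos.2 then '^' else 'v'))
    let horiz := String.ofList (List.replicate (target.1 - pos.1).natAbs (if target.1 < pos.1 then '<' else '>'))
    let output := if sv then output ++ vert else output
    let output := output ++ horiz
    let output := if !sv then output ++ vert else output
    let output := output ++ "A"
    (output, target)

def navigate_numbers (code : String) : String :=
  (code.toList.foldl pvStepA ("", ((2 : Int), (3 : Int)))).1

-- ===== PORT B =====
-- the precomputed transition table MOVES of Source B, keyed by the two-character string prev++next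
def pvMoves : PySem.Dict String String :=
  PySem.Dict.ofList [("77", "A"), ("78", ">A"), ("79", ">>A"), ("74", "vA"), ("75", "v>A"), ("76", "v>>A"), ("71", "vvA"), ("72", "vv>A"), ("73", "vv>>A"), ("70", ">vvvA"), ("7A", ">>vvvA"),
    ("87", "<A"), ("88", "A"), ("89", ">A"), ("84", "<vA"), ("85", "vA"), ("86", "v>A"), ("81", "<vvA"), ("82", "vvA"), ("83", "vv>A"), ("80", "vvvA"), ("8A", "vvv>A"),
    ("97", "<<A"), ("98", "<A"), ("99", "A"), ("94", "<<vA"), ("95", "<vA"), ("96", "vA"), ("91", "<<vvA"), ("92", "<vvA"), ("93", "vvA"), ("90", "<vvvA"), ("9A", "vvvA"),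
    ("47", "^A"), ("48", "^>A"), ("49", "^>>A"), ("44", "A"), ("45", ">A"), ("46", ">>A"), ("41", "vA"), ("42", "v>A"), ("43", "v>>A"), ("40", ">vvA"), ("4A", ">>vvA"),
    ("57", "<^A"), ("58", "^A"), ("59", "^>A"), ("54", "<A"), ("55", "A"), ("56", ">A"), ("51", "<vA"), ("52", "vA"), ("53", "v>A"), ("50", "vvA"), ("5A", "vv>A"),
    ("67", "<<^A"), ("68", "<^A"), ("69", "^A"), ("64", "<<A"), ("65", "<A"), ("66", "A"), ("61", "<<vA"), ("62", "<vA"), ("63", "vA"), ("60", "<vvA"), ("6A", "vvA"),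
    ("17", "^^A"), ("18", "^^>A"), ("19", "^^>>A"), ("14", "^A"), ("15", "^>A"), ("16", "^>>A"), ("11", "A"), ("12", ">A"), ("13", ">>A"), ("10", ">vA"), ("1A", ">>vA"),
    ("27", "<^^A"), ("28", "^^A"), ("29", "^^>A"), ("24", "<^A"), ("25", "^A"), ("26", "^>A"), ("21", "<A"), ("22", "A"), ("23", ">A"), ("20", "vA"), ("2A", "v>A"),
    ("37", "<<^^A"), ("38", "<^^A"), ("39", "^^A"), ("34", "<<^A"), ("35", "<^A"), ("36", "^A"), ("31", "<<A"), ("32", "<A"), ("33", "A"), ("30", "<vA"), ("3A", "vA"),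
    ("07", "^^^<A"), ("08", "^^^A"), ("09", "^^^>A"), ("04", "^^<A"), ("05", "^^A"), ("06", "^^>A"), ("01", "^<A"), ("02", "^A"), ("03", "^>A"), ("00", "A"), ("0A", ">A"),
    ("A7", "^^^<<A"), ("A8", "<^^^A"), ("A9", "^^^A"), ("A4", "^^<<A"), ("A5", "<^^A"), ("A6", "^^A"), ("A1", "^<<A"), ("A2", "<^A"), ("A3", "^A"), ("A0", "<A"), ("AA", "A")]

-- B: join one table lookup per adjacent pair of 'A' + code (KeyError excluded by Pre_, getD unreached)
def navigate_numbers_alt (code : String) : String :=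
  String.join ((('A' :: code.toList).zip code.toList).map
    (fun pc => (pvMoves.get? (String.ofList [pc.1, pc.2])).getD ""))

-- ===== PRECONDITION & SPEC =====
-- Pre_ excludes exactly the inputs with a character outside the keypad, on which A raises KeyError
def Pre_navigate_numbers (code : String) : Prop :=
  code.toList.all (fun c => (['7', '8', '9', '4', '5', '6', '1', '2', '3', '0', 'A'] : List Char).contains c) = true
instance (code : String) : Decidable (Pre_navigate_numbers code) := by
  unfold Pre_navigate_numbers; infer_instance
def pvWitness_navigate_numbers : String := "029A"

def Spec_navigate_numbers (code : String) (out : String) : Prop := out = navigate_numbers_alt code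
instance (code : String) (out : String) : Decidable (Spec_navigate_numbers code out) := by unfold Spec_navigate_numbers; infer_instance

-- ===== CLAIM (what is proved, stated in full; the proofs are below) =====
def Claim_equal_navigate_numbers : Prop := ∀ (code : String), Dom_navigate_numbers code → Pre_navigate_numbers code → Spec_navigate_numbers code (navigate_numbers code)

-- ===== LEMMAS AND PROOFS =====

def pvKeys : List Char := ['7', '8', '9', '4', '5', '6', '1', '2', '3', '0', 'A']

def pvPos (c : Char) : Int × Int := (pvKeypad.get? c).getD (0, 0)

def pvTbl (p c : Char) : String := (pvMoves.get? (String.ofList [p, c])).getD ""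

theorem pvJoin_shift (a : String) (l : List String) :
    List.foldl (fun r s => r ++ s) a l = a ++ List.foldl (fun r s => r ++ s) "" l := by
  induction l generalizing a with
  | nil => simp
  | cons x xs ih =>
    simp only [List.foldl_cons]
    rw [ih (a ++ x), ih ("" ++ x), String.append_assoc]
    simp

-- each A step only appends to the output
theorem pvStepA_out (o : String) (p : Int × Int) (ch : Char) :
    pvStepA (o, p) ch = (o ++ (pvStepA ("", p) ch).1, (pvStepA ("", p) ch).2) := by
  simp only [pvStepA]
  split_ifs <;> simp [String.append_assoc]

-- one step of A from the position of key p on key c produces exactly the table entry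
set_option maxRecDepth 4000 in
theorem pvStepA_tbl (p c : Char) (hp : p ∈ pvKeys) (hc : c ∈ pvKeys) :
    pvStepA ("", pvPos p) c = (pvTbl p c, pvPos c) := by
  fin_cases hp <;> fin_cases hc <;> decide

theorem pvFold_tbl (l : List Char) (hl : ∀ c ∈ l, c ∈ pvKeys) (p : Char) (hp : p ∈ pvKeys) (o : String) :
    (l.foldl pvStepA (o, pvPos p)).1 =
      o ++ String.join (((p :: l).zip l).map (fun pc => pvTbl pc.1 pc.2)) := by
  induction l generalizing p o with
  | nil => simp [String.join]
  | cons c t ih =>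
    have hc := hl c (List.mem_cons_self ..)
    simp only [List.foldl_cons, List.zip_cons_cons, List.map_cons, String.join]
    rw [pvStepA_out, pvStepA_tbl p c hp hc,
        ih (fun x hx => hl x (List.mem_cons_of_mem _ hx)) c hc]
    simp only [String.join, String.append_assoc]
    rw [pvJoin_shift ("" ++ pvTbl p c)]
    simp

-- ===== VERDICT (by name: the statement is the Claim_ definition above) =====
theorem navigate_numbers_spec : Claim_equal_navigate_numbers := by
  intro code _ hpre
  unfold Pre_navigate_numbers at hpre
  simp only [List.all_eq_true, List.contains_iff_mem] at hpre
  unfold Spec_navigate_numbers navigate_numbers navigate_numbers_alt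
  have : (("", ((2 : Int), (3 : Int))) : String × (Int × Int)) = ("", pvPos 'A') := by decide
  rw [this, pvFold_tbl code.toList hpre 'A' (by decide) ""]
  simp [pvTbl, String.join]
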